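-- pv_equiv track=rewrite | github.com/yanan1116/MemRL | memrl/run/alfworld_rl_runner.py | _sanitize_reflection_trajectory
-- ===== SOURCE A (Python) =====
-- from typing import Dict, Set, Any
-- from typing import List, Optional
--
-- def _sanitize_reflection_trajectory(trajectory: List[Dict[str, Any]]) -> List[Dict[str, str]]:
--     cleaned: List[Dict[str, str]] = []
--     task_start_prefix = "Now, it's your turn to solve a new task."
--     last_task_start_idx = None
--
--     for idx, msg in enumerate(trajectory or []):
--         if not isinstance(msg, dict):
--             continue
--         role = msg.get("role")
--         content = msg.get("content", "")
--         if role != "user":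
--             continue
--         if not isinstance(content, str):
--             content = str(content)
--         if content.strip().startswith(task_start_prefix):
--             last_task_start_idx = idx
--
--     if last_task_start_idx is not None:
--         for msg in (trajectory or [])[last_task_start_idx + 1 :]:
--             if not isinstance(msg, dict):
--                 continue
--             role = msg.get("role")
--             content = msg.get("content", "")
--             if role == "system":
--                 continue
--             if not isinstance(content, str):
--                 content = str(content)
--             if content.strip().startswith("You attempted this task before."):
--                 continue
--             if content.strip().startswith("Here is an example of how to solve the task:"):
--                 continue
--             if role == "user" and content.strip().startswith("Observation:"):
--                 cleaned.append({"role": "user", "content": content})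
--             elif role == "assistant":
--                 cleaned.append({"role": "assistant", "content": content})
--         return cleaned
--
--     # Fallback when task marker is missing: keep only obs/action, drop example header.
--     for msg in trajectory or []:
--         if not isinstance(msg, dict):
--             continue
--         role = msg.get("role")
--         content = msg.get("content", "")
--         if role == "system":
--             continue
--         if not isinstance(content, str):
--             content = str(content)
--         if content.strip().startswith("You attempted this task before."):
--             continue
--         if content.strip().startswith("Here is an example of how to solve the task:"):
--             continue
--         if role == "user" and content.strip().startswith("Observation:"):
--             cleaned.append({"role": "user", "content": content})
--         elif role == "assistant":
--             cleaned.append({"role": "assistant", "content": content})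
--     return cleaned
-- ===== SOURCE B (Python) =====
-- def _sanitize_reflection_trajectory(trajectory):
--     # Single pass: a user task-start marker resets the accumulator, so the
--     # result is the filtered suffix after the last marker (or the whole list).
--     cleaned = []
--     for msg in trajectory or []:
--         if not isinstance(msg, dict):
--             continue
--         role = msg.get("role")
--         content = msg.get("content", "")
--         if not isinstance(content, str):
--             content = str(content)
--         s = content.strip()
--         if role == "user" and s.startswith("Now, it's your turn to solve a new task."):
--             cleaned = []
--             continue
--         if role == "system":
--             continue
--         if s.startswith("You attempted this task before.") or s.startswith("Here is an example of how to solve the task:"):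
--             continue
--         if role == "user" and s.startswith("Observation:"):
--             cleaned.append({"role": "user", "content": content})
--         elif role == "assistant":
--             cleaned.append({"role": "assistant", "content": content})
--     return cleaned
-- ===== Notes on version B (the rewrite author's own statement) =====
-- stated objective: simpler
-- what changed: Replaces A's find-last-marker index pass plus two duplicated filter loops (suffix slice vs whole-list fallback) with a single scan whose accumulator is reset to empty at each user task-start marker; Pre_ only excludes assoc lists binding 'role'/'content' twice, which no Python dict can represent.
import Mathlib
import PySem

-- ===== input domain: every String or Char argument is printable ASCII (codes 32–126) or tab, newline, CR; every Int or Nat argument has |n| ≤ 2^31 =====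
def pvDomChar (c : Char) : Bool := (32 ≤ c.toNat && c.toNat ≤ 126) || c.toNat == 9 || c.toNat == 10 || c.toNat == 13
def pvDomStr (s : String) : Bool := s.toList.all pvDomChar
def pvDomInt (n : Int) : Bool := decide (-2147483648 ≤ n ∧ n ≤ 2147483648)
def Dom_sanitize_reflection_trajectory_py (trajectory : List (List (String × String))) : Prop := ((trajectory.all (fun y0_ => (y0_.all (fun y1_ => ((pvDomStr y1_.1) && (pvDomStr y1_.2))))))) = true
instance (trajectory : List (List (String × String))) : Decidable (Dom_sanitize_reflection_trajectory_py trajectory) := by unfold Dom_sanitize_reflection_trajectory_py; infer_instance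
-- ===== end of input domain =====

-- B replaces A's find-last-marker pass plus two duplicated filter loops by one
-- accumulator-reset scan (objective: simpler decomposition, same cost).

-- ===== PORT A =====
-- A's filter loop body (written once here; A's Python duplicates it in two loops)
def pvFiltA (cleaned : List (List (String × String))) (msg : List (String × String)) : List (List (String × String)) :=
  let role := (PySem.Dict.mk msg).get? "role"
  let content := (PySem.Dict.mk msg).getD "content" ""
  if role == some "system" then cleaned
  else if PySem.Str.startswith (PySem.Str.strip content) "You attempted this task before." then cleaned
  else if PySem.Str.startswith (PySem.Str.strip content) "Here is an example of how to solve the task:" then cleaned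
  else if role == some "user" && PySem.Str.startswith (PySem.Str.strip content) "Observation:" then
    cleaned ++ [[("role", "user"), ("content", content)]]
  else if role == some "assistant" then
    cleaned ++ [[("role", "assistant"), ("content", content)]]
  else cleaned

-- A's first loop: last index of a user message whose stripped content starts with the marker
def pvLastA (trajectory : List (List (String × String))) : Option Int :=
  (PySem.List.enumerate trajectory).foldl (fun last p =>
    let role := (PySem.Dict.mk p.2).get? "role"
    let content := (PySem.Dict.mk p.2).getD "content" ""
    if role != some "user" then last
    else if PySem.Str.startswith (PySem.Str.strip content) "Now, it's your turn to solve a new task." then some p.1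
    else last) none

def sanitize_reflection_trajectory_py (trajectory : List (List (String × String))) : List (List (String × String)) :=
  match pvLastA trajectory with
  | some i => (PySem.List.slice trajectory (some (i + 1)) none).foldl pvFiltA []
  | none => trajectory.foldl pvFiltA []

-- ===== PORT B =====
def pvStepB (cleaned : List (List (String × String))) (msg : List (String × String)) : List (List (String × String)) :=
  let role := (PySem.Dict.mk msg).get? "role"
  let content := (PySem.Dict.mk msg).getD "content" ""
  let s := PySem.Str.strip content
  if role == some "user" && PySem.Str.startswith s "Now, it's your turn to solve a new task." then []
  else if role == some "system" then cleaned
  else if (PySem.Str.startswith s "You attempted this task before." || PySem.Str.startswith s "Here is an example of how to solve the task:") then cleaned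
  else if role == some "user" && PySem.Str.startswith s "Observation:" then
    cleaned ++ [[("role", "user"), ("content", content)]]
  else if role == some "assistant" then
    cleaned ++ [[("role", "assistant"), ("content", content)]]
  else cleaned

def sanitize_reflection_trajectory_py_alt (trajectory : List (List (String × String))) : List (List (String × String)) :=
  trajectory.foldl pvStepB []

-- ===== PRECONDITION & SPEC =====
-- Pre_ excludes trajectories in which a message binds the "role" or the "content" key
-- more than once: such association lists do not arise from any Python dict (dict keys are
-- unique), so the dict encoding is not faithful there; A and Python's dict semantics make
-- that corner anybody's choice.
def Pre_sanitize_reflection_trajectory_py (trajectory : List (List (String × String))) : Prop :=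
  ∀ msg ∈ trajectory, (msg.map Prod.fst).count "role" ≤ 1 ∧ (msg.map Prod.fst).count "content" ≤ 1
instance (trajectory : List (List (String × String))) : Decidable (Pre_sanitize_reflection_trajectory_py trajectory) := by unfold Pre_sanitize_reflection_trajectory_py; infer_instance

def pvWitness_sanitize_reflection_trajectory_py : (List (List (String × String))) :=
  [[("role", "user"), ("content", "Observation: you are in a room.")], [("role", "assistant"), ("content", "go north")]]

def Spec_sanitize_reflection_trajectory_py (trajectory : List (List (String × String))) (out : List (List (String × String))) : Prop := out = sanitize_reflection_trajectory_py_alt trajectory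
instance (trajectory : List (List (String × String))) (out : List (List (String × String))) : Decidable (Spec_sanitize_reflection_trajectory_py trajectory out) := by unfold Spec_sanitize_reflection_trajectory_py; infer_instance

-- ===== CLAIM (what is proved, stated in full; the proofs are below) =====
def Claim_equal_sanitize_reflection_trajectory_py : Prop := ∀ (trajectory : List (List (String × String))), Dom_sanitize_reflection_trajectory_py trajectory → Pre_sanitize_reflection_trajectory_py trajectory → Spec_sanitize_reflection_trajectory_py trajectory (sanitize_reflection_trajectory_py trajectory)

-- ===== LEMMAS AND PROOFS =====

-- "msg is a user task-start marker"
def pvM (msg : List (String × String)) : Bool :=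
  ((PySem.Dict.mk msg).get? "role" == some "user") &&
    PySem.Str.startswith (PySem.Str.strip ((PySem.Dict.mk msg).getD "content" ""))
      "Now, it's your turn to solve a new task."

lemma pvStepB_marker (acc : List (List (String × String))) (msg : List (String × String))
    (h : pvM msg = true) : pvStepB acc msg = [] := by
  unfold pvM at h
  unfold pvStepB
  simp only [h, if_true]

lemma pvStepB_not_marker (acc : List (List (String × String))) (msg : List (String × String))
    (h : pvM msg = false) : pvStepB acc msg = pvFiltA acc msg := by
  unfold pvM at h
  unfold pvStepB pvFiltA
  simp only [h, Bool.false_eq_true, if_false]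
  cases h2 : PySem.Str.startswith (PySem.Str.strip ((PySem.Dict.mk msg).getD "content" "")) "You attempted this task before." <;>
  cases h3 : PySem.Str.startswith (PySem.Str.strip ((PySem.Dict.mk msg).getD "content" "")) "Here is an example of how to solve the task:" <;>
    simp only [h2, h3, Bool.false_or, Bool.true_or, Bool.or_self, if_true,
      Bool.false_eq_true, if_false, Bool.true_eq_false]

lemma pvLastA_append (l : List (List (String × String))) (x : List (String × String)) :
    pvLastA (l ++ [x]) = if pvM x then some (l.length : Int) else pvLastA l := by
  unfold pvLastA pvM
  rw [PySem.List.enumerate_append, List.foldl_append]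
  simp only [PySem.List.enumerate_cons, PySem.List.enumerate_nil, List.foldl_cons, List.foldl_nil]
  cases hu : ((PySem.Dict.mk x).get? "role" == some "user") <;>
  cases hm : PySem.Str.startswith (PySem.Str.strip ((PySem.Dict.mk x).getD "content" "")) "Now, it's your turn to solve a new task." <;>
    simp at hu hm ⊢ <;> simp [hu, hm]

lemma pvLastA_bound (l : List (List (String × String))) (i : Int)
    (h : pvLastA l = some i) : 0 ≤ i ∧ i < l.length := by
  induction l using List.reverseRecOn with
  | nil => simp [pvLastA, PySem.List.enumerate_nil] at h
  | append_singleton l x ih =>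
    rw [pvLastA_append] at h
    simp only [List.length_append, List.length_cons, List.length_nil]
    cases hx : pvM x with
    | true =>
      simp [hx] at h
      push_cast
      omega
    | false =>
      simp [hx] at h
      have := ih h
      push_cast
      omega

-- main invariant, by induction on the list from the right
lemma pvMain (l : List (List (String × String))) :
    ∀ acc : List (List (String × String)),
      (pvLastA l = none → l.foldl pvStepB acc = l.foldl pvFiltA acc) ∧
      (∀ i, pvLastA l = some i →
        l.foldl pvStepB acc = ((l.drop (i + 1).toNat).foldl pvFiltA [])) := by
  induction l using List.reverseRecOn with
  | nil =>
    intro acc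
    refine ⟨fun _ => rfl, fun i h => ?_⟩
    simp [pvLastA, PySem.List.enumerate_nil] at h
  | append_singleton l x ih =>
    intro acc
    constructor
    · intro hnone
      rw [pvLastA_append] at hnone
      cases hx : pvM x with
      | true => simp [hx] at hnone
      | false =>
        simp only [hx, Bool.false_eq_true, if_false] at hnone
        rw [List.foldl_append, List.foldl_append]
        simp only [List.foldl_cons, List.foldl_nil]
        rw [(ih acc).1 hnone, pvStepB_not_marker _ _ hx]
    · intro i hsome
      rw [pvLastA_append] at hsome
      cases hx : pvM x with
      | true =>
        simp only [hx, if_true, Option.some.injEq] at hsome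
        subst hsome
        rw [List.foldl_append]
        simp only [List.foldl_cons, List.foldl_nil]
        rw [pvStepB_marker _ _ hx]
        have hdrop : (l ++ [x]).drop (((l.length : Int)) + 1).toNat = [] := by
          have hn : (((l.length : Int)) + 1).toNat = l.length + 1 := by omega
          rw [hn]
          apply List.drop_eq_nil_of_le
          simp
        rw [hdrop]
        rfl
      | false =>
        simp only [hx, Bool.false_eq_true, if_false] at hsome
        have hb := pvLastA_bound l i hsome
        rw [List.foldl_append]
        simp only [List.foldl_cons, List.foldl_nil]
        rw [(ih acc).2 i hsome, pvStepB_not_marker _ _ hx]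
        have hdrop : (l ++ [x]).drop (i + 1).toNat = l.drop (i + 1).toNat ++ [x] := by
          rw [List.drop_append_of_le_length (by omega)]
        rw [hdrop, List.foldl_append]
        simp only [List.foldl_cons, List.foldl_nil]

-- ===== VERDICT (by name: the statement is the Claim_ definition above) =====
theorem sanitize_reflection_trajectory_py_spec : Claim_equal_sanitize_reflection_trajectory_py := by
  intro trajectory _ _
  unfold Spec_sanitize_reflection_trajectory_py
  unfold sanitize_reflection_trajectory_py sanitize_reflection_trajectory_py_alt
  cases h : pvLastA trajectory with
  | none => dsimp only; exact ((pvMain trajectory []).1 h).symm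
  | some i =>
    have hb := pvLastA_bound trajectory i h
    dsimp only
    rw [PySem.List.slice_from trajectory (show (0:Int) ≤ i + 1 by omega)]
    exact ((pvMain trajectory []).2 i h).symm
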